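-- pv_equiv track=rewrite | github.com/zainsci/coding-problems | min-sum-four-dig/main.py | minimumSum
-- ===== SOURCE A (Python) =====
-- def minimumSum(num):
--     digs = sorted([int(d) for d in str(num)])
--     n = len(digs)
--     total = 0
--
--     for i in range(n // 2):
--         left = digs[i]
--         right = digs[n-1-i]
--         combo = left * 10 + right
--         total += combo
--
--     return total
-- ===== SOURCE B (Python) =====
-- def minimumSum(num):
--     # Histogram approach: count digit occurrences in a dict, then walk the
--     # buckets in increasing key order, assigning tens weight to lower-half
--     # positions and units weight to upper-half positions.
--     counts = {}
--     for ch in str(num):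
--         d = int(ch)
--         counts[d] = counts.get(d, 0) + 1
--     n = len(str(num))
--     h = n // 2
--     total = 0
--     pos = 0
--     for d in sorted(counts):
--         for _ in range(counts[d]):
--             if pos < h:
--                 total += 10 * d
--             elif pos >= n - h:
--                 total += d
--             pos += 1
--     return total
-- ===== Notes on version B (the rewrite author's own statement) =====
-- stated objective: alternative
-- what changed: Replaces sort-the-digits-then-pair-by-index with a digit histogram: B counts digit occurrences in a dict and walks the buckets in increasing key order with a running position counter, weighting lower-half positions by ten and upper-half positions by one.
import Mathlib
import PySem

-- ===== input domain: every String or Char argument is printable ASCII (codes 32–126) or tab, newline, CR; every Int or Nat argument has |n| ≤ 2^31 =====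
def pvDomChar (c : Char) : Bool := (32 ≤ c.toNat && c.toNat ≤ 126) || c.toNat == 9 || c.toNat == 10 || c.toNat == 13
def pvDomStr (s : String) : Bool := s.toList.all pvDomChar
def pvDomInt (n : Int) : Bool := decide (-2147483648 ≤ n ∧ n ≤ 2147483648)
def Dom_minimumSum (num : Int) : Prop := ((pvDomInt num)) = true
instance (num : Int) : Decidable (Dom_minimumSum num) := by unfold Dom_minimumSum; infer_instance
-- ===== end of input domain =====

-- B replaces A's sort-then-pair-by-index by a digit histogram (dict counter) walked
-- in increasing key order with a running position counter (alternative algorithm).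

-- ===== PORT A =====
-- int(d) for d of str(num): under Pre_ (num ≥ 0) every char is a digit, so ofStr? is some;
-- the .getD 0 default is never reached on admitted inputs (negative num, where int('-') raises, is excluded by Pre_).
def minimumSum (num : Int) : Int :=
  let digs := PySem.List.sorted
    (((PySem.Int.toStr num).toList).map (fun d => (PySem.Int.ofStr? (String.mk [d])).getD 0)) (fun x => x) false
  let n : Int := digs.length
  (PySem.List.pyRange 0 (PySem.Int.floordiv n 2) 1).foldl
    (fun total i =>
      let left := PySem.List.pyGetD digs i 0
      let right := PySem.List.pyGetD digs (n - 1 - i) 0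
      let combo := left * 10 + right
      total + combo) 0

-- ===== PORT B =====
-- counts[d] in the loop: d is always a present key (it comes from sorted(counts)), so the
-- Python subscript never raises; ported as getD d 0 which agrees on present keys.
def minimumSum_alt (num : Int) : Int :=
  let s := (PySem.Int.toStr num).toList
  let counts := s.foldl
    (fun (cs : PySem.Dict Int Int) ch =>
      let d := (PySem.Int.ofStr? (String.mk [ch])).getD 0
      cs.insert d (cs.getD d 0 + 1)) PySem.Dict.empty
  let n : Int := s.length
  let h := PySem.Int.floordiv n 2
  let res := (PySem.List.sorted counts.keys (fun x => x) false).foldl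
    (fun (st : Int × Int) d =>
      (PySem.List.pyRange 0 (counts.getD d 0) 1).foldl
        (fun (st : Int × Int) _ =>
          (if st.2 < h then st.1 + 10 * d
           else if st.2 ≥ n - h then st.1 + d
           else st.1, st.2 + 1)) st) ((0 : Int), (0 : Int))
  res.1

-- ===== PRECONDITION & SPEC =====
-- Pre_ excludes negative num, on which str(num) starts with '-' and int('-') raises ValueError in both A and B.
def Pre_minimumSum (num : Int) : Prop := 0 ≤ num
instance (num : Int) : Decidable (Pre_minimumSum num) := by unfold Pre_minimumSum; infer_instance
def pvWitness_minimumSum : Int := (2932)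
def Spec_minimumSum (num : Int) (out : Int) : Prop := out = minimumSum_alt num
instance (num : Int) (out : Int) : Decidable (Spec_minimumSum num out) := by unfold Spec_minimumSum; infer_instance

-- ===== CLAIM (what is proved, stated in full; the proofs are below) =====
def Claim_equal_minimumSum : Prop := ∀ (num : Int), Dom_minimumSum num → Pre_minimumSum num → Spec_minimumSum num (minimumSum num)

-- ===== LEMMAS AND PROOFS =====

-- A's pairing loop over k = 0 .. m-1 (pairing index k with length-1-k) equals
-- ten times the sum of the first m elements plus the sum of the last m elements.
theorem pv_loop (L : List Int) (m : Nat) (hm : m ≤ L.length) :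
    ((List.range m).foldl (fun (total : Int) (k : Nat) =>
        total + (PySem.List.pyGetD L (k : Int) 0 * 10
          + PySem.List.pyGetD L ((L.length : Int) - 1 - (k : Int)) 0)) 0)
      = 10 * (L.take m).sum + (L.drop (L.length - m)).sum := by
  induction m with
  | zero => simp
  | succ m ih =>
    have hm' : m ≤ L.length := Nat.le_of_succ_le hm
    have hltm : m < L.length := hm
    have hlt : L.length - 1 - m < L.length := by omega
    have hidx : (L.length : Int) - 1 - (m : Int) = ((L.length - 1 - m : Nat) : Int) := by omega
    have h2 : L.length - (m + 1) = L.length - 1 - m := by omega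
    rw [List.range_succ, List.foldl_append, List.foldl_cons, List.foldl_nil, ih hm', hidx]
    have ht : (L.take (m + 1)).sum = (L.take m).sum + L[m] := by
      rw [List.take_add_one, List.sum_append, List.getElem?_eq_getElem hltm]
      simp
    have hd : (L.drop (L.length - (m + 1))).sum
        = L[L.length - 1 - m] + (L.drop (L.length - m)).sum := by
      rw [h2, List.drop_eq_getElem_cons hlt]
      have h3 : L.length - 1 - m + 1 = L.length - m := by omega
      rw [h3, List.sum_cons]
    rw [ht, hd]
    simp [PySem.List.pyGetD_natCast, List.getD_eq_getElem?_getD,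
          List.getElem?_eq_getElem hltm, List.getElem?_eq_getElem hlt]
    ring

-- A's whole loop, packaged: pairing over the first half of any list L.
theorem pv_A (M : List Int) :
    ((PySem.List.pyRange 0 (PySem.Int.floordiv ((PySem.List.sorted M (fun x => x) false).length : Int) 2) 1).foldl
      (fun (total : Int) i =>
        total + (PySem.List.pyGetD (PySem.List.sorted M (fun x => x) false) i 0 * 10
          + PySem.List.pyGetD (PySem.List.sorted M (fun x => x) false)
              (((PySem.List.sorted M (fun x => x) false).length : Int) - 1 - i) 0)) 0)
      = 10 * ((PySem.List.sorted M (fun x => x) false).take (M.length / 2)).sum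
        + ((PySem.List.sorted M (fun x => x) false).drop (M.length - M.length / 2)).sum := by
  set L := PySem.List.sorted M (fun x => x) false with hL
  have hlen : L.length = M.length := PySem.List.length_sorted M (fun x => x) false
  have hfd : PySem.Int.floordiv ((L.length : Int)) 2 = ((L.length / 2 : Nat) : Int) := by
    rw [PySem.Int.floordiv_eq_ediv_of_pos (by norm_num)]
    omega
  have hh : L.length / 2 ≤ L.length := Nat.div_le_self _ _
  rw [hfd, ← hlen]
  simp only [PySem.List.pyRange_one, Int.sub_zero, Int.toNat_natCast, Int.zero_add,
    List.foldl_map]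
  exact pv_loop L (L.length / 2) hh

-- A fold whose body ignores the element depends only on the list length.
theorem pv_foldl_const {α β σ : Type} (F : σ → σ) :
    ∀ (l : List α) (l' : List β), l.length = l'.length →
      ∀ (st : σ), l.foldl (fun s _ => F s) st = l'.foldl (fun s _ => F s) st := by
  intro l
  induction l with
  | nil => intro l' hl st; cases l' <;> simp_all
  | cons a t ih =>
    intro l' hl st
    cases l' with
    | nil => simp at hl
    | cons b t' => simp only [List.foldl_cons]; exact ih t' (by simpa using hl) (F st)

-- Folding a two-argument body over a replicate only ever sees the replicated element.
theorem pv_foldl_replicate {β σ : Type} (f : σ → β → σ) (d : β) :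
    ∀ (m : Nat) (st : σ),
      (List.replicate m d).foldl f st = (List.replicate m d).foldl (fun s _ => f s d) st := by
  intro m
  induction m with
  | zero => intro st; simp
  | succ m ih => intro st; simp only [List.replicate_succ, List.foldl_cons]; exact ih (f st d)

-- Counting the members of a flatMap of replicates over a nodup key list.
theorem pv_count_flat (c : Int → Nat) (x : Int) :
    ∀ (ks : List Int), ks.Nodup →
      (ks.flatMap (fun d => List.replicate (c d) d)).count x
        = if x ∈ ks then c x else 0 := by
  intro ks
  induction ks with
  | nil => simp
  | cons k t ih =>
    intro hnd
    rw [List.flatMap_cons, List.count_append, List.count_replicate, ih hnd.of_cons]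
    rcases List.nodup_cons.mp hnd with ⟨hk, _⟩
    by_cases hx : x = k
    · subst hx; simp [hk]
    · simp [hx, Ne.symm hx]

-- A flatMap of replicates over a strictly increasing key list is nondecreasing.
theorem pv_flat_pairwise (c : Int → Nat) :
    ∀ (ks : List Int), ks.Pairwise (· < ·) →
      (ks.flatMap (fun d => List.replicate (c d) d)).Pairwise (· ≤ ·) := by
  intro ks
  induction ks with
  | nil => simp
  | cons k t ih =>
    intro hp
    rw [List.flatMap_cons]
    rcases List.pairwise_cons.mp hp with ⟨hk, ht⟩
    refine List.pairwise_append.mpr ⟨?_, ih ht, ?_⟩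
    · simp [List.pairwise_replicate]
    · intro a ha b hb
      rcases List.mem_flatMap.mp hb with ⟨d, hd, hbd⟩
      have h1 := List.eq_of_mem_replicate ha
      have h2 := List.eq_of_mem_replicate hbd
      subst h1; subst h2
      exact le_of_lt (hk _ hd)

-- Post-composing the element through f is folding over the mapped list.
theorem pv_foldl_comp {α β σ : Type} (f : α → β) (g : σ → β → σ) :
    ∀ (l : List α) (st : σ),
      l.foldl (fun s a => g s (f a)) st = (l.map f).foldl g st := by
  intro l
  induction l with
  | nil => intro st; simp
  | cons a t ih => intro st; simp only [List.map_cons, List.foldl_cons]; exact ih _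

-- Folding over a flatMap is the nested fold.
theorem pv_foldl_flatMap {α β σ : Type} (g : α → List β) (f : σ → β → σ) :
    ∀ (ks : List α) (st : σ),
      (ks.flatMap g).foldl f st = ks.foldl (fun s k => (g k).foldl f s) st := by
  intro ks
  induction ks with
  | nil => intro st; simp
  | cons k t ih => intro st; simp [List.flatMap_cons, List.foldl_append, ih]

-- The position-weighted accumulation over a list equals ten times the sum of the
-- elements before position h plus the sum of the elements from position nh on.
theorem pv_phi (h nh : Int) (hle : h ≤ nh) :
    ∀ (S : List Int) (t p : Int),
      (S.foldl (fun (st : Int × Int) e =>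
          (if st.2 < h then st.1 + 10 * e else if st.2 ≥ nh then st.1 + e else st.1,
           st.2 + 1)) (t, p)).1
        = t + 10 * (S.take (h - p).toNat).sum + (S.drop (nh - p).toNat).sum := by
  intro S
  induction S with
  | nil => intro t p; simp
  | cons a s ih =>
    intro t p
    rw [List.foldl_cons]
    by_cases h1 : p < h
    · have e1 : (h - p).toNat = (h - (p + 1)).toNat + 1 := by omega
      have e2 : (nh - p).toNat = (nh - (p + 1)).toNat + 1 := by omega
      simp only [h1, if_pos]
      rw [ih (t + 10 * a) (p + 1), e1, e2, List.take_succ_cons, List.drop_succ_cons,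
          List.sum_cons]
      ring
    · by_cases h2 : p ≥ nh
      · have e1 : (h - p).toNat = 0 := by omega
        have e2 : (h - (p + 1)).toNat = 0 := by omega
        have e3 : (nh - p).toNat = 0 := by omega
        have e4 : (nh - (p + 1)).toNat = 0 := by omega
        simp only [h1, if_neg, h2, if_pos, not_false_eq_true]
        rw [ih (t + a) (p + 1), e1, e2, e3, e4]
        simp
        ring
      · have e1 : (h - p).toNat = 0 := by omega
        have e2 : (h - (p + 1)).toNat = 0 := by omega
        have e3 : (nh - p).toNat = (nh - (p + 1)).toNat + 1 := by omega
        simp only [h1, if_neg, h2, not_false_eq_true]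
        rw [ih t (p + 1), e1, e2, e3, List.drop_succ_cons]
        simp

-- B's whole computation, packaged: the histogram walk over counter M equals the
-- two weighted half-sums of the sorted list.
theorem pv_B (M : List Int) :
    (((PySem.List.sorted (PySem.Dict.counter M).keys (fun x => x) false).foldl
      (fun (st : Int × Int) d =>
        (PySem.List.pyRange 0 ((PySem.Dict.counter M).getD d 0) 1).foldl
          (fun (st : Int × Int) _ =>
            (if st.2 < PySem.Int.floordiv ((M.length : Int)) 2 then st.1 + 10 * d
             else if st.2 ≥ (M.length : Int) - PySem.Int.floordiv ((M.length : Int)) 2 then st.1 + d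
             else st.1, st.2 + 1)) st) ((0 : Int), (0 : Int))).1)
      = 10 * ((PySem.List.sorted M (fun x => x) false).take (M.length / 2)).sum
        + ((PySem.List.sorted M (fun x => x) false).drop (M.length - M.length / 2)).sum := by
  set h : Int := PySem.Int.floordiv ((M.length : Int)) 2 with hh
  set K := PySem.List.sorted (PySem.Dict.counter M).keys (fun x => x) false with hK
  have hfd : h = ((M.length / 2 : Nat) : Int) := by
    rw [hh, PySem.Int.floordiv_eq_ediv_of_pos (by norm_num)]
    omega
  have hKnd : K.Nodup :=
    (PySem.List.sorted_perm _ _ _).nodup_iff.mpr (PySem.Dict.nodup_keys_counter M)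
  have hKle : K.Pairwise (fun a b => a ≤ b) := PySem.List.sorted_pairwise _ _
  have hKlt : K.Pairwise (· < ·) :=
    (hKle.and hKnd).imp (fun hab => lt_of_le_of_ne hab.1 hab.2)
  have hKmem : ∀ x, x ∈ K ↔ x ∈ M := by
    intro x
    rw [hK, PySem.List.mem_sorted, PySem.Dict.keys_counter, PySem.Set.mem_ofList]
  set F := K.flatMap (fun d => List.replicate (M.count d) d) with hF
  have hcount : ∀ x, F.count x = M.count x := by
    intro x
    rw [hF, pv_count_flat (fun d => M.count d) x K hKnd]
    by_cases hx : x ∈ K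
    · simp [hx]
    · simp only [hx, if_false]
      symm
      exact List.count_eq_zero.mpr (fun hmem => hx ((hKmem x).mpr hmem))
  have hFperm : F.Perm M := List.perm_iff_count.mpr hcount
  have hFpair : F.Pairwise (· ≤ ·) := pv_flat_pairwise (fun d => M.count d) K hKlt
  have hLF : PySem.List.sorted M (fun x => x) false = F :=
    PySem.List.sorted_id_eq_of_perm_of_pairwise _ _ hFperm hFpair
  -- each bucket's inner fold is the fold over the corresponding replicate block
  have hbucket : ∀ (d : Int) (st : Int × Int),
      (PySem.List.pyRange 0 ((PySem.Dict.counter M).getD d 0) 1).foldl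
        (fun (st : Int × Int) _ =>
          (if st.2 < h then st.1 + 10 * d
           else if st.2 ≥ (M.length : Int) - h then st.1 + d
           else st.1, st.2 + 1)) st
      = (List.replicate (M.count d) d).foldl
          (fun (st : Int × Int) e =>
            (if st.2 < h then st.1 + 10 * e
             else if st.2 ≥ (M.length : Int) - h then st.1 + e
             else st.1, st.2 + 1)) st := by
    intro d st
    rw [PySem.Dict.getD_counter, pv_foldl_replicate]
    apply pv_foldl_const
    rw [PySem.List.length_pyRange_one, List.length_replicate]
    simp
  have hnest : K.foldl
      (fun (st : Int × Int) d =>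
        (PySem.List.pyRange 0 ((PySem.Dict.counter M).getD d 0) 1).foldl
          (fun (st : Int × Int) _ =>
            (if st.2 < h then st.1 + 10 * d
             else if st.2 ≥ (M.length : Int) - h then st.1 + d
             else st.1, st.2 + 1)) st) ((0 : Int), (0 : Int))
      = F.foldl (fun (st : Int × Int) e =>
          (if st.2 < h then st.1 + 10 * e
           else if st.2 ≥ (M.length : Int) - h then st.1 + e
           else st.1, st.2 + 1)) ((0 : Int), (0 : Int)) := by
    rw [hF, pv_foldl_flatMap]
    exact congrArg (fun fn => List.foldl fn ((0 : Int), (0 : Int)) K)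
      (funext fun st => funext fun d => hbucket d st)
  rw [hnest, hLF]
  have hle : h ≤ (M.length : Int) - h := by omega
  rw [pv_phi h ((M.length : Int) - h) hle F 0 0]
  have t1 : (h - 0).toNat = M.length / 2 := by omega
  have t2 : ((M.length : Int) - h - 0).toNat = M.length - M.length / 2 := by omega
  rw [t1, t2]
  ring

-- ===== VERDICT (by name: the statement is the Claim_ definition above) =====
theorem minimumSum_spec : Claim_equal_minimumSum := by
  intro num _ _
  unfold Spec_minimumSum minimumSum minimumSum_alt
  dsimp only
  set f : Char → Int := fun d => (PySem.Int.ofStr? (String.mk [d])).getD 0 with hf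
  set s : List Char := (PySem.Int.toStr num).toList with hs
  have hc : (s.foldl
      (fun (cs : PySem.Dict Int Int) ch => cs.insert (f ch) (cs.getD (f ch) 0 + 1))
      PySem.Dict.empty) = PySem.Dict.counter (s.map f) := by
    exact (pv_foldl_comp f (fun (cs : PySem.Dict Int Int) d => cs.insert d (cs.getD d 0 + 1))
      s PySem.Dict.empty).trans (PySem.Dict.foldl_insert_getD_add_one_eq_counter (s.map f))
  rw [hc]
  have hlen : (s.map f).length = s.length := by simp
  rw [pv_A (s.map f), ← hlen]
  exact (pv_B (s.map f)).symm
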